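-- pv_equiv track=rewrite | github.com/DianaZagirova/download_agent | src/text_utils.py | sections_to_flat_text
-- ===== SOURCE A (Python) =====
-- from typing import Dict, Optional, List, Tuple
--
-- def sections_to_flat_text(sections: Dict[str, str]) -> str:
--     """
--     Convert a dictionary of sections to flat text.
--
--     Args:
--         sections: Dictionary mapping section names to content
--
--     Returns:
--         Flat text with section headers
--     """
--     if not sections:
--         return ""
--
--     # Sort sections by name to ensure consistent ordering
--     # Special sections like 'Abstract', 'Introduction' should come first
--     priority_sections = ['Abstract', 'Introduction', 'Main', 'Methods', 'Results', 'Discussion', 'Conclusion']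
--
--     # Create a list of (priority, section_name) tuples for sorting
--     section_order = []
--     for name in sections.keys():
--         try:
--             # Find the position in priority list, or use a large number if not found
--             priority = priority_sections.index(name)
--         except ValueError:
--             priority = 100  # Not in priority list
--
--         section_order.append((priority, name))
--
--     # Sort by priority
--     section_order.sort()
--
--     # Build the flat text
--     parts = []
--     for _, section_name in section_order:
--         content = sections[section_name].strip()
--         if not content:
--             continue
--
--         # Add section header (except for 'Main')
--         if section_name.lower() != 'main':
--             parts.append(f"## {section_name}\n\n")
--
--         # Add content
--         parts.append(f"{content}\n\n")
--
--     return "".join(parts).strip()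
-- ===== SOURCE B (Python) =====
-- def sections_to_flat_text(sections):
--     """Same result as A: walk the fixed priority template first, then the
--     alphabetically sorted remaining section names; no tuple-sort."""
--     if not sections:
--         return ""
--     priority_sections = ['Abstract', 'Introduction', 'Main', 'Methods', 'Results', 'Discussion', 'Conclusion']
--     ordered = [n for n in priority_sections if n in sections]
--     ordered += sorted(n for n in sections if n not in priority_sections)
--     parts = []
--     for name in ordered:
--         content = sections[name].strip()
--         if not content:
--             continue
--         if name.lower() != 'main':
--             parts.append("## " + name + "\n\n")
--         parts.append(content + "\n\n")
--     return "".join(parts).strip()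
-- ===== Notes on version B (the rewrite author's own statement) =====
-- stated objective: simpler
-- what changed: Replaces A's build-(priority,name)-tuples-and-sort pass with a direct walk of the fixed priority template (selecting names present in the dict) followed by the alphabetically sorted remaining names; the per-section rendering loop is unchanged.
import Mathlib
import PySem

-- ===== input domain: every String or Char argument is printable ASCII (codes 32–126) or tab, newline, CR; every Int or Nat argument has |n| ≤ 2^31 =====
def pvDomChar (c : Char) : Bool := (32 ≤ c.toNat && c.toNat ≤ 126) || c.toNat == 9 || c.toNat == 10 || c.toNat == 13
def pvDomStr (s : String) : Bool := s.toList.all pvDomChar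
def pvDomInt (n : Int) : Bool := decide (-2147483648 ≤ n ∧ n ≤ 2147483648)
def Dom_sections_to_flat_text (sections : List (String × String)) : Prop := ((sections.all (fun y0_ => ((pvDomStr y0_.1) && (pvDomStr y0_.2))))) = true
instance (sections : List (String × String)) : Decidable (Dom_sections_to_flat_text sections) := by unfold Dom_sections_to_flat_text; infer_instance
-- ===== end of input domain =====

-- B replaces A's build-(priority,name)-tuples-and-sort pass by a walk of the fixed
-- priority template followed by the alphabetically sorted remaining names (simpler).

-- the priority template both Python versions spell out
def pvPriorityList : List String :=
  ["Abstract", "Introduction", "Main", "Methods", "Results", "Discussion", "Conclusion"]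

-- ===== PORT A =====
def sections_to_flat_text (sections : List (String × String)) : String :=
  if sections = [] then ""
  else
    let d := PySem.Dict.ofList sections
    let priority_sections := pvPriorityList
    let section_order : List (Int × String) :=
      d.keys.foldl (fun acc name =>
        let priority : Int :=
          match PySem.List.index? priority_sections name with
          | some i => (i : Int)
          | none => 100
        acc ++ [(priority, name)]) []
    let section_order := PySem.List.sorted2 section_order (fun p => p.1) (fun p => p.2)
    let parts : List String :=
      section_order.foldl (fun parts p =>
        let content := PySem.Str.strip (d.getD p.2 "")
        if content = "" then parts
        else
          (if PySem.Str.lower p.2 ≠ "main" then parts ++ ["## " ++ p.2 ++ "\n\n"] else parts)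
            ++ [content ++ "\n\n"]) []
    PySem.Str.strip (PySem.Str.join "" parts)

-- ===== PORT B =====
def sections_to_flat_text_alt (sections : List (String × String)) : String :=
  if sections = [] then ""
  else
    let d := PySem.Dict.ofList sections
    let ordered : List String :=
      pvPriorityList.filter (fun n => d.contains n)
        ++ PySem.List.sorted (d.keys.filter (fun n => !(pvPriorityList.contains n))) (fun n => n)
    let parts : List String :=
      ordered.foldl (fun parts name =>
        let content := PySem.Str.strip (d.getD name "")
        if content ≠ "" then
          (if PySem.Str.lower name ≠ "main" then parts ++ ["## " ++ name ++ "\n\n"] else parts)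
            ++ [content ++ "\n\n"]
        else parts) []
    PySem.Str.strip (PySem.Str.join "" parts)


-- ===== PRECONDITION & SPEC =====
def Spec_sections_to_flat_text (sections : List (String × String)) (out : String) : Prop := out = sections_to_flat_text_alt sections
instance (sections : List (String × String)) (out : String) : Decidable (Spec_sections_to_flat_text sections out) := by unfold Spec_sections_to_flat_text; infer_instance

-- ===== CLAIM (what is proved, stated in full; the proofs are below) =====
def Claim_equal_sections_to_flat_text : Prop := ∀ (sections : List (String × String)), Dom_sections_to_flat_text sections → Spec_sections_to_flat_text sections (sections_to_flat_text sections)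

-- ===== LEMMAS AND PROOFS =====


def pvPrio (name : String) : Int :=
  match PySem.List.index? pvPriorityList name with
  | some i => (i : Int)
  | none => 100

theorem pvPrio_of_not_mem {n : String} (h : n ∉ pvPriorityList) : pvPrio n = 100 := by
  unfold pvPrio
  rw [(PySem.List.index?_eq_none_iff pvPriorityList n).mpr h]

theorem pvPrio_lt_of_mem {n : String} (h : n ∈ pvPriorityList) : pvPrio n < 100 := by
  unfold pvPrio
  cases heq : PySem.List.index? pvPriorityList n with
  | none => exact absurd h ((PySem.List.index?_eq_none_iff pvPriorityList n).mp heq)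
  | some i =>
    obtain ⟨pre, suf, hsplit, hlen, -⟩ := (PySem.List.index?_eq_some_iff pvPriorityList n i).mp heq
    have h7 : pvPriorityList.length = 7 := by decide
    have : i < 7 := by
      have := congrArg List.length hsplit
      simp [h7] at this
      omega
    simp only []
    omega

theorem pv_pairwise_pri :
    pvPriorityList.Pairwise (fun a b => pvPrio a < pvPrio b) := by decide


theorem pv_lex_lt {a b : String} (h : pvPrio a < pvPrio b ∨ (pvPrio a = pvPrio b ∧ a < b)) :
    (toLex ((pvPrio a, a) : Int × String) : Lex (Int × String)) < toLex (pvPrio b, b) := by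
  rw [Prod.Lex.lt_iff]
  simpa using h

theorem pv_sorted_order (d : PySem.Dict String String) (hk : d.keys.Nodup) :
    PySem.List.sorted (d.keys.map (fun n => (pvPrio n, n))) (fun p => toLex p)
      = (pvPriorityList.filter (fun n => d.contains n)).map (fun n => (pvPrio n, n))
        ++ (PySem.List.sorted (d.keys.filter (fun n => !(pvPriorityList.contains n)))
              (fun n => n)).map (fun n => (pvPrio n, n)) := by
  set f : String → Int × String := fun n => (pvPrio n, n) with hf
  set p1 : List String := pvPriorityList.filter (fun n => d.contains n) with hp1
  set p2 : List String :=
    PySem.List.sorted (d.keys.filter (fun n => !(pvPriorityList.contains n))) (fun n => n) with hp2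
  have hpri_nodup : pvPriorityList.Nodup := by decide
  have hmem_p1 : ∀ {n : String}, n ∈ p1 → n ∈ pvPriorityList := by
    intro n hn; exact (List.mem_filter.mp hn).1
  have hmem_p2 : ∀ {n : String}, n ∈ p2 → n ∉ pvPriorityList := by
    intro n hn
    have := (PySem.List.mem_sorted _ _ _ n).mp hn
    have := (List.mem_filter.mp this).2
    simpa using this
  -- permutation
  have hperm : (p1 ++ p2).Perm d.keys := by
    have h1 : p1.Perm (d.keys.filter (fun n => pvPriorityList.contains n)) := by
      rw [List.perm_ext_iff_of_nodup (hpri_nodup.filter _) (hk.filter _)]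
      intro n
      simp only [List.mem_filter, PySem.Dict.contains_iff_mem_keys, List.contains_iff_mem]
      tauto
    have h2 : p2.Perm (d.keys.filter (fun n => !(pvPriorityList.contains n))) :=
      PySem.List.sorted_perm _ _ _
    exact (h1.append h2).trans (List.filter_append_perm _ _)
  have hperm' : ((p1 ++ p2).map f).Perm (d.keys.map f) := hperm.map f
  -- pairwise
  have hpw : ((p1 ++ p2).map f).Pairwise
      (fun a b => (toLex a : Lex (Int × String)) < toLex b) := by
    rw [List.pairwise_map, List.pairwise_append]
    refine ⟨?_, ?_, ?_⟩
    · exact List.Pairwise.filter _ (pv_pairwise_pri.imp (fun h => pv_lex_lt (Or.inl h)))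
    · have hs : p2.Pairwise (fun a b => a ≤ b) := PySem.List.sorted_pairwise _ _
      have hnd : p2.Nodup := (PySem.List.sorted_perm (d.keys.filter (fun n => !(pvPriorityList.contains n))) (fun n => n) false).symm.nodup (hk.filter _)
      have hlt : p2.Pairwise (fun a b => a < b) :=
        (hs.and hnd).imp (fun h => lt_of_le_of_ne h.1 h.2)
      refine hlt.imp_of_mem (fun {a b} ha hb hab => ?_)
      exact pv_lex_lt (Or.inr ⟨by rw [pvPrio_of_not_mem (hmem_p2 ha), pvPrio_of_not_mem (hmem_p2 hb)], hab⟩)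
    · intro a ha b hb
      refine pv_lex_lt (Or.inl ?_)
      rw [pvPrio_of_not_mem (hmem_p2 hb)]
      exact pvPrio_lt_of_mem (hmem_p1 ha)
  rw [PySem.List.sorted_eq_of_perm_of_pairwise_lt _ _ _ hperm' hpw, List.map_append]

theorem pv_sorted2_eq_sorted_toLex (xs : List (Int × String)) :
    PySem.List.sorted2 xs (fun p => p.1) (fun p => p.2)
      = PySem.List.sorted xs (fun p => toLex p) := by
  unfold PySem.List.sorted2 PySem.List.sorted
  simp only [if_neg (by decide : ¬ (false = true))]
  have hb : (fun (a b : Int × String) =>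
      decide (a.1 < b.1) || (!decide (b.1 < a.1) && decide (a.2 < b.2)))
      = fun (a b : Int × String) => decide ((toLex a : Lex (Int × String)) < toLex b) := by
    funext a b
    have h : ((toLex a : Lex (Int × String)) < toLex b)
        ↔ (a.1 < b.1 ∨ (¬ (b.1 < a.1) ∧ a.2 < b.2)) := by
      rw [Prod.Lex.lt_iff]
      simp only [ofLex_toLex]
      constructor
      · rintro (h1 | ⟨h1, h2⟩)
        · exact Or.inl h1
        · exact Or.inr ⟨by rw [h1]; exact lt_irrefl _, h2⟩
      · rintro (h1 | ⟨h1, h2⟩)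
        · exact Or.inl h1
        · rcases lt_trichotomy a.1 b.1 with h | h | h
          · exact Or.inl h
          · exact Or.inr ⟨h, h2⟩
          · exact absurd h h1
    by_cases h1 : a.1 < b.1
    · simp [h, h1]
    · by_cases h2 : b.1 < a.1 <;> simp [h, h1, h2]
  rw [hb]

theorem pv_fold_eq (d : PySem.Dict String String) (l : List String) (init : List String) :
    (l.map (fun n => (pvPrio n, n))).foldl (fun parts p =>
        let content := PySem.Str.strip (d.getD p.2 "")
        if content = "" then parts
        else
          (if PySem.Str.lower p.2 ≠ "main" then parts ++ ["## " ++ p.2 ++ "\n\n"] else parts)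
            ++ [content ++ "\n\n"]) init
      = l.foldl (fun parts name =>
        let content := PySem.Str.strip (d.getD name "")
        if content ≠ "" then
          (if PySem.Str.lower name ≠ "main" then parts ++ ["## " ++ name ++ "\n\n"] else parts)
            ++ [content ++ "\n\n"]
        else parts) init := by
  rw [List.foldl_map]
  congr 1
  funext parts n
  by_cases h : PySem.Str.strip (d.getD n "") = "" <;> simp [h]

theorem pv_main (sections : List (String × String)) :
    sections_to_flat_text sections = sections_to_flat_text_alt sections := by
  unfold sections_to_flat_text sections_to_flat_text_alt
  by_cases h : sections = []
  · simp [h]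
  · simp only [if_neg h]
    set d := PySem.Dict.ofList sections with hd
    have hfun : (fun (acc : List (Int × String)) (name : String) =>
        acc ++ [((match PySem.List.index? pvPriorityList name with
          | some i => (i : Int) | none => 100), name)])
        = fun acc name => acc ++ [(pvPrio name, name)] := rfl
    rw [hfun]
    rw [PySem.List.foldl_append_singleton_eq_map (fun name => (pvPrio name, name)) d.keys []]
    rw [List.nil_append]
    rw [pv_sorted2_eq_sorted_toLex]
    rw [pv_sorted_order d (PySem.Dict.nodup_keys_ofList sections)]
    rw [← List.map_append, pv_fold_eq d]

-- ===== VERDICT (by name: the statement is the Claim_ definition above) =====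
theorem sections_to_flat_text_spec : Claim_equal_sections_to_flat_text := by
  intro sections _
  unfold Spec_sections_to_flat_text
  exact pv_main sections
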